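-- pv_equiv track=rewrite | github.com/sys-ryan/algorithm-test | 0414/1891.py | gogo
-- ===== SOURCE A (Python) =====
-- def gogo(r, c, size, x, y):
--   if size == 1:
--     return ''
--
--   m = size//2
--   if x < r+m and y < c+m:
--     return '2' + gogo(r, c, m ,x, y)
--   elif x < r+m and y >= c+m:
--     return '1' + gogo(r, c+m, m, x, y)
--   elif x >= r+m and y < c+m:
--     return '3' + gogo(r+m, c, m, x, y)
--   else:
--     return '4' + gogo(r+m, c+m, m, x, y)
-- ===== SOURCE B (Python) =====
-- def gogo(r, c, size, x, y):
--   # Work in coordinates relative to (r, c): precompute the halving chain of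
--   # sizes, then fold over it, picking each digit by arithmetic on two flags.
--   chain = []
--   s = size
--   while s != 1:
--     s //= 2
--     chain.append(s)
--   u, v = x - r, y - c
--   digits = []
--   for m in chain:
--     a = 1 if u >= m else 0
--     b = 1 if v >= m else 0
--     digits.append(str(2 - b + a * (1 + 2 * b)))
--     u -= a * m
--     v -= b * m
--   return ''.join(digits)
-- ===== Notes on version B (the rewrite author's own statement) =====
-- stated objective: alternative
-- what changed: Replaces the recursive descent that threads the (r,c) origin and prepends digits by a staged version: first build the halving chain of sizes, then fold over it in (r,c)-relative coordinates, computing each digit arithmetically from two 0/1 flags and joining the digit list at the end.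
import Mathlib
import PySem

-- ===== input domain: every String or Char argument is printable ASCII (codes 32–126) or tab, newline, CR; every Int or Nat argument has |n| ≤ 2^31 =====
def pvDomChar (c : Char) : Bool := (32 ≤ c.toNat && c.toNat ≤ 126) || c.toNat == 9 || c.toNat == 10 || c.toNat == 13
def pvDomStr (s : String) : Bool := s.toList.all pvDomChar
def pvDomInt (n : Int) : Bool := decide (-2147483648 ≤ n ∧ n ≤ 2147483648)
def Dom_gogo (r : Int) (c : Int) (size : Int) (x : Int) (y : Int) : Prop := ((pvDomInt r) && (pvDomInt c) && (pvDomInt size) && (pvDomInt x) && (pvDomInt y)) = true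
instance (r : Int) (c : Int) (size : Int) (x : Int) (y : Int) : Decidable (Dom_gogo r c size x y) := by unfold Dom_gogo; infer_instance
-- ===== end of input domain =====

-- B precomputes the halving chain of sizes, then folds over it in (r,c)-relative
-- coordinates, picking each digit by arithmetic on two 0/1 flags; alternative
-- staged decomposition, same cost.

-- ===== PORT A =====
-- fuel makes the recursion total in Lean; for size ≥ 1 (Pre_) it is never
-- exhausted, outside Pre_ the Python recurses forever (RecursionError).
def gogoAuxA (fuel : Nat) (r c size x y : Int) : String :=
  match fuel with
  | 0 => ""
  | fuel + 1 =>
    if size = 1 then "" else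
    let m := PySem.Int.floordiv size 2
    if x < r + m ∧ y < c + m then "2" ++ gogoAuxA fuel r c m x y
    else if x < r + m ∧ y ≥ c + m then "1" ++ gogoAuxA fuel r (c + m) m x y
    else if x ≥ r + m ∧ y < c + m then "3" ++ gogoAuxA fuel (r + m) c m x y
    else "4" ++ gogoAuxA fuel (r + m) (c + m) m x y

def gogo (r : Int) (c : Int) (size : Int) (x : Int) (y : Int) : String :=
  gogoAuxA (size.toNat + 1) r c size x y

-- ===== PORT B =====
-- the halving chain of Source B's first while-loop (same fuel guard for totality)
def gogoChain (fuel : Nat) (s : Int) : List Int :=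
  match fuel with
  | 0 => []
  | fuel + 1 =>
    if s = 1 then [] else
    let s' := PySem.Int.floordiv s 2
    s' :: gogoChain fuel s'

-- one step of Source B's for-loop: state (u, v, digits)
def gogoStep (st : Int × Int × List String) (m : Int) : Int × Int × List String :=
  let a : Int := if st.1 ≥ m then 1 else 0
  let b : Int := if st.2.1 ≥ m then 1 else 0
  (st.1 - a * m, st.2.1 - b * m, st.2.2 ++ [PySem.Int.toStr (2 - b + a * (1 + 2 * b))])

def gogo_alt (r : Int) (c : Int) (size : Int) (x : Int) (y : Int) : String :=
  String.join ((gogoChain (size.toNat + 1) size).foldl gogoStep (x - r, y - c, [])).2.2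

-- ===== PRECONDITION & SPEC =====
-- Pre_ excludes size ≤ 0, on which the Python A recurses forever
-- (RecursionError); B's chain-building loop does not terminate there either.
def Pre_gogo (r : Int) (c : Int) (size : Int) (x : Int) (y : Int) : Prop := 1 ≤ size
instance (r : Int) (c : Int) (size : Int) (x : Int) (y : Int) : Decidable (Pre_gogo r c size x y) := by unfold Pre_gogo; infer_instance
def pvWitness_gogo : Int × Int × Int × Int × Int := (0, 0, 8, 3, 5)

def Spec_gogo (r : Int) (c : Int) (size : Int) (x : Int) (y : Int) (out : String) : Prop := out = gogo_alt r c size x y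
instance (r : Int) (c : Int) (size : Int) (x : Int) (y : Int) (out : String) : Decidable (Spec_gogo r c size x y out) := by unfold Spec_gogo; infer_instance

-- ===== CLAIM (what is proved, stated in full; the proofs are below) =====
def Claim_equal_gogo : Prop := ∀ (r : Int) (c : Int) (size : Int) (x : Int) (y : Int), Dom_gogo r c size x y → Pre_gogo r c size x y → Spec_gogo r c size x y (gogo r c size x y)

-- ===== LEMMAS AND PROOFS =====
theorem join_snoc (ds : List String) (d : String) :
    String.join (ds ++ [d]) = String.join ds ++ d := by
  simp [String.join, List.foldl_append]

theorem fold_chain_eq (fuel : Nat) : ∀ (r c size x y : Int) (ds : List String),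
    String.join (((gogoChain fuel size).foldl gogoStep (x - r, y - c, ds)).2.2)
      = String.join ds ++ gogoAuxA fuel r c size x y := by
  induction fuel with
  | zero => intro r c size x y ds; simp [gogoChain, gogoAuxA]
  | succ n ih =>
    intro r c size x y ds
    by_cases h1 : size = 1
    · simp [gogoChain, gogoAuxA, h1]
    · simp only [gogoChain, gogoAuxA, h1, if_false, List.foldl_cons]
      generalize PySem.Int.floordiv size 2 = m
      by_cases hx : x - r ≥ m <;> by_cases hy : y - c ≥ m
      · have hx' : ¬ x < r + m := by omega
        have hy' : ¬ y < c + m := by omega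
        have e : gogoStep (x - r, y - c, ds) m = (x - (r + m), y - (c + m), ds ++ ["4"]) := by
          simp only [gogoStep, hx, hy, if_pos]
          norm_num
          constructor; · ring
          constructor; · ring
          decide
        rw [e, ih, join_snoc]
        simp [hx', hy', String.append_assoc]
      · have hx' : ¬ x < r + m := by omega
        have hy' : y < c + m := by omega
        have e : gogoStep (x - r, y - c, ds) m = (x - (r + m), y - c, ds ++ ["3"]) := by
          simp only [gogoStep, hx, hy, if_pos]
          norm_num
          constructor; · ring
          decide
        rw [e, ih, join_snoc]
        simp [hx', hy', String.append_assoc]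
      · have hx' : x < r + m := by omega
        have hy' : ¬ y < c + m := by omega
        have e : gogoStep (x - r, y - c, ds) m = (x - r, y - (c + m), ds ++ ["1"]) := by
          simp only [gogoStep, hx, hy, if_pos]
          norm_num
          constructor; · ring
          decide
        rw [e, ih, join_snoc]
        simp [hx', hy', String.append_assoc]
      · have hx' : x < r + m := by omega
        have hy' : y < c + m := by omega
        have e : gogoStep (x - r, y - c, ds) m = (x - r, y - c, ds ++ ["2"]) := by
          simp only [gogoStep, hx, hy]
          norm_num
          decide
        rw [e, ih, join_snoc]
        simp [hx', hy', String.append_assoc]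

-- ===== VERDICT (by name: the statement is the Claim_ definition above) =====
theorem gogo_spec : Claim_equal_gogo := by
  intro r c size x y _ _
  unfold Spec_gogo gogo gogo_alt
  rw [fold_chain_eq]
  simp [String.join]
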